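-- pv_equiv track=rewrite | github.com/AskNowQA/KrantikariQA | data_loader.py | break_path
-- ===== SOURCE A (Python) =====
-- def break_path(path,special_chars):
--     '''
--         Given a path which always starts with special characters . Give two paths.
--     :param path:
--     :param special_chars:  a list of special characters
--     :return:
--     '''
--
--     second_sc_index = None
--
--     for index,p in enumerate(path[1:]):
--         if p in special_chars:
--             second_sc_index = index + 1
--     if second_sc_index:
--         path1 = path[:second_sc_index]
--         path2 = path[second_sc_index:]
--     else:
--         path1 = path
--         path2 = None
--
--     return path1,path2
-- ===== SOURCE B (Python) =====
-- def break_path(path, special_chars):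
--     # reverse early-exit scan for the last special-char index (always >= 1)
--     for i in range(len(path) - 1, 0, -1):
--         if path[i] in special_chars:
--             return path[:i], path[i:]
--     return path, None
-- ===== Notes on version B (the rewrite author's own statement) =====
-- stated objective: alternative
-- what changed: A scans path[1:] forward, remembering the last index whose character is in special_chars; B scans indices from len(path)-1 down to 1 and returns at the first match, so the last special-char index is found by a reverse early-exit scan with no accumulator.
import Mathlib
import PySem

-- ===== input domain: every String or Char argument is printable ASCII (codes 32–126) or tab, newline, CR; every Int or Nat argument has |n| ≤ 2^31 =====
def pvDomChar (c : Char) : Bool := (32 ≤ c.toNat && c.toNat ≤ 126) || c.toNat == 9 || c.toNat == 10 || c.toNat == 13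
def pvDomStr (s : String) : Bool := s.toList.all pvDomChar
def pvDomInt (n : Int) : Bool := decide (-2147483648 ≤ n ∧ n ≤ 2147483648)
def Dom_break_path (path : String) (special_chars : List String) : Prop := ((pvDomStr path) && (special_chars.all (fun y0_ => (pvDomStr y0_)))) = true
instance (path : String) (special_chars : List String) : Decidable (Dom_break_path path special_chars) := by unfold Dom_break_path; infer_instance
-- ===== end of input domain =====

-- B replaces A's forward full scan (remembering the last special-char index) by a reverse
-- early-exit scan that stops at the first match from the end (objective: alternative/idiomatic).

-- ===== PORT A =====
-- `p in special_chars`: a one-character string p equals some element of special_chars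
def bpChk (special_chars : List String) (c : Char) : Bool :=
  special_chars.any (fun s => s.toList == [c])

def break_path (path : String) (special_chars : List String) : Option String × Option String :=
  let cs := path.toList
  -- for index, p in enumerate(path[1:]): if p in special_chars: second_sc_index = index + 1
  let second : Option Int :=
    (PySem.List.enumerate (PySem.List.slice cs (some 1) none)).foldl
      (fun acc ip => if bpChk special_chars ip.2 then some (ip.1 + 1) else acc) none
  match second with
  | some i =>
      -- `if second_sc_index:` — truthiness of the Int
      if i ≠ 0 then
        (some (String.ofList (PySem.List.slice cs none (some i))),
         some (String.ofList (PySem.List.slice cs (some i) none)))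
      else (some path, none)
  | none => (some path, none)

-- ===== PORT B =====
-- for i in range(len(path)-1, 0, -1): if path[i] in special_chars: return path[:i], path[i:]
-- bpFind cs sc k inspects indices k, k-1, …, 1 and returns the first match
-- (path[i] ported as getD with default ' ': every visited index 1 ≤ i ≤ len-1 is in range)
def bpFind (cs : List Char) (sc : List String) : Nat → Option Nat
  | 0 => none
  | Nat.succ k => if bpChk sc (cs.getD (k + 1) ' ') then some (k + 1) else bpFind cs sc k

def break_path_alt (path : String) (special_chars : List String) : Option String × Option String :=
  let cs := path.toList
  match bpFind cs special_chars (cs.length - 1) with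
  | some i => (some (String.ofList (cs.take i)), some (String.ofList (cs.drop i)))
  | none => (some path, none)

-- ===== PRECONDITION & SPEC =====
def Spec_break_path (path : String) (special_chars : List String) (out : Option String × Option String) : Prop := out = break_path_alt path special_chars
instance (path : String) (special_chars : List String) (out : Option String × Option String) : Decidable (Spec_break_path path special_chars out) := by unfold Spec_break_path; infer_instance

-- ===== CLAIM (what is proved, stated in full; the proofs are below) =====
def Claim_equal_break_path : Prop := ∀ (path : String) (special_chars : List String), Dom_break_path path special_chars → Spec_break_path path special_chars (break_path path special_chars)

-- ===== LEMMAS AND PROOFS =====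

-- tail indexing: (cs.drop 1).getD j = cs.getD (j+1)
theorem bp_getD_tail (cs : List Char) (j : Nat) (d : Char) :
    (cs.drop 1).getD j d = cs.getD (j + 1) d := by
  simp [List.getD]

-- A's forward last-match fold over List.range equals B's reverse first-match recursion
theorem bp_range_foldl_eq_bpFind (cs : List Char) (sc : List String) (k : Nat) :
    (List.range k).foldl
      (fun acc j => if bpChk sc (cs.getD (j + 1) ' ') then some (j + 1) else acc) none
    = bpFind cs sc k := by
  induction k with
  | zero => simp [bpFind]
  | succ k ih =>
      rw [List.range_succ, List.foldl_append]
      simp only [List.foldl, bpFind]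
      rw [ih]

-- lifting the Nat-valued last-match fold to the Int-valued one A computes
theorem bp_foldl_map (Q : Nat → Bool) (l : List Nat) (acc : Option Nat) :
    l.foldl (fun acc j => if Q j then some ((j : Int) + 1) else acc)
      (acc.map (fun k : Nat => (k : Int)))
    = (l.foldl (fun acc j => if Q j then some (j + 1) else acc) acc).map
        (fun k : Nat => (k : Int)) := by
  induction l generalizing acc with
  | nil => rfl
  | cons x l ih =>
      simp only [List.foldl]
      by_cases h : Q x
      · rw [← ih]; simp [h]
      · rw [← ih]; simp [h]

-- any index bpFind returns is ≥ 1
theorem bp_bpFind_pos (cs : List Char) (sc : List String) (k : Nat) (i : Nat)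
    (h : bpFind cs sc k = some i) : 1 ≤ i := by
  induction k with
  | zero => simp [bpFind] at h
  | succ k ih =>
      rw [show bpFind cs sc (k + 1)
            = if bpChk sc (cs.getD (k + 1) ' ') then some (k + 1) else bpFind cs sc k
          from rfl] at h
      split at h
      · injection h with h'; omega
      · exact ih h

-- A's accumulator equals bpFind's result, cast to Int
theorem bp_second_eq (cs : List Char) (sc : List String) :
    (PySem.List.enumerate (PySem.List.slice cs (some 1) none)).foldl
      (fun acc ip => if bpChk sc ip.2 then some (ip.1 + 1) else acc) none
    = (bpFind cs sc (cs.length - 1)).map (fun k : Nat => (k : Int)) := by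
  rw [PySem.List.slice_from_one, ← List.drop_one,
      PySem.List.enumerate_eq_map_pyRange (cs.drop 1) ' ',
      PySem.List.len_eq, PySem.List.pyRange_zero_natCast, List.foldl_map, List.foldl_map]
  simp only [PySem.List.pyGetD_natCast, bp_getD_tail]
  have := bp_foldl_map (fun j => bpChk sc (cs.getD (j + 1) ' '))
      (List.range ((cs.drop 1).length)) none
  simp only [Option.map_none] at this
  rw [this, bp_range_foldl_eq_bpFind]
  simp

-- ===== VERDICT (by name: the statement is the Claim_ definition above) =====
theorem break_path_spec : Claim_equal_break_path := by
  intro path sc _dom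
  unfold Spec_break_path break_path break_path_alt
  simp only [bp_second_eq]
  cases h : bpFind path.toList sc (path.toList.length - 1) with
  | none => simp
  | some i =>
      have hi : 1 ≤ i := bp_bpFind_pos _ _ _ _ h
      have hne : (i : Int) ≠ 0 := by
        have h1 : (1 : Int) ≤ (i : Int) := by exact_mod_cast hi
        omega
      simp only [Option.map_some, ne_eq, hne, not_false_iff, if_pos]
      rw [PySem.List.slice_to_natCast, PySem.List.slice_from_natCast]
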